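-- pv_equiv track=rewrite | github.com/bhargavraju/practice-dsa | stacks/bracket_expressions.py | evaluate
-- ===== SOURCE A (Python) =====
-- def evaluate(expr):
--     st = [True]
--     char_map = {}
--     for i in range(len(expr)):
--         ch = expr[i]
--         if ch == '(':
--             if i > 0 and expr[i-1] == '-':
--                 st.append(not st[-1])
--             else:
--                 st.append(st[-1])
--         elif ch == ')':
--             st.pop()
--         elif ch in '+-':
--             continue
--         else:
--             global_sign = st[-1]
--             local_sign = True
--             if i > 0 and expr[i-1] == '-':
--                 local_sign = False
--             final_sign = local_sign == global_sign
--             char_map[ch] = final_sign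
--
--     return char_map
-- ===== SOURCE B (Python) =====
-- def evaluate(expr):
--     # Recursive-descent: the call stack replaces A's explicit sign stack.
--     char_map = {}
--
--     def parse(i, sign):
--         # scan under inherited sign; return index just past the ')' that ends
--         # this group (or end of string)
--         while i < len(expr):
--             ch = expr[i]
--             if ch == ')':
--                 return i + 1
--             if ch == '(':
--                 neg = i > 0 and expr[i - 1] == '-'
--                 i = parse(i + 1, sign != neg)
--             elif ch in '+-':
--                 i += 1
--             else:
--                 minus = i > 0 and expr[i - 1] == '-'
--                 char_map[ch] = (not minus) == sign
--                 i += 1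
--         return i
--
--     parse(0, True)
--     return char_map
-- ===== Notes on version B (the rewrite author's own statement) =====
-- stated objective: alternative
-- what changed: A's flat index loop with an explicit boolean sign stack is replaced by a recursive-descent parser whose call stack carries the inherited sign: parse(i, sign) scans a group, recurses on '(' with the sign flipped when preceded by '-', and returns past the matching ')'.
import Mathlib
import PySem

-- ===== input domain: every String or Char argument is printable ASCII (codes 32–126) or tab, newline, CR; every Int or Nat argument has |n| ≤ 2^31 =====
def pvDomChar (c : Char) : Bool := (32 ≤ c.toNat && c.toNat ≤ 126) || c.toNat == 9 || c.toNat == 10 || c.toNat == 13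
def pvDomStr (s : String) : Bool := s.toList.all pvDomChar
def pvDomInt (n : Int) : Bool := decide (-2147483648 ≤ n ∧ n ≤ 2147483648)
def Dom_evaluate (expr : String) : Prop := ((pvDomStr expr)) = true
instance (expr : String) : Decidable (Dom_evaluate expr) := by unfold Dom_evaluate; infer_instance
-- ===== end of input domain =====

-- B replaces A's explicit boolean sign stack by a recursive-descent parser whose
-- call stack carries the inherited sign (objective: alternative decomposition).

-- ===== PORT A =====
-- one iteration of A's loop; Python's list st (append/pop at the end) is
-- represented with its top at the HEAD of the Lean list (st[-1] = head, append = cons, pop = tail)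
def stepA (l : List Char) (s : List Bool × PySem.Dict String Bool) (i : Nat) :
    List Bool × PySem.Dict String Bool :=
  let ch := l.getD i ' '
  if ch = '(' then
    if 0 < i ∧ l.getD (i-1) ' ' = '-' then ((!(s.1.headD true)) :: s.1, s.2)
    else ((s.1.headD true) :: s.1, s.2)
  else if ch = ')' then (s.1.tail, s.2)
  else if ch = '+' ∨ ch = '-' then s
  else
    let gs := s.1.headD true
    let ls := !(decide (0 < i) && decide (l.getD (i-1) ' ' = '-'))
    (s.1, s.2.insert (String.ofList [ch]) (ls == gs))

def evaluate (expr : String) : List (String × Bool) :=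
  let l := expr.toList
  (((List.range l.length).foldl (stepA l) ([true], PySem.Dict.empty)).2).items

-- ===== PORT B =====
-- parse i sign cm: scan from i under inherited sign; fuel only guards
-- termination (l.length + 1 always suffices, proved in the lemmas below)
def parseB (l : List Char) : Nat → Nat → Bool → PySem.Dict String Bool →
    Nat × PySem.Dict String Bool
  | 0, i, _, cm => (i, cm)
  | fuel+1, i, sign, cm =>
    if i < l.length then
      let ch := l.getD i ' '
      if ch = ')' then (i+1, cm)
      else if ch = '(' then
        let neg := decide (0 < i) && decide (l.getD (i-1) ' ' = '-')
        let r := parseB l fuel (i+1) (sign != neg) cm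
        parseB l fuel r.1 sign r.2
      else if ch = '+' ∨ ch = '-' then parseB l fuel (i+1) sign cm
      else
        let minus := decide (0 < i) && decide (l.getD (i-1) ' ' = '-')
        parseB l fuel (i+1) sign (cm.insert (String.ofList [ch]) ((!minus) == sign))
    else (i, cm)

def evaluate_alt (expr : String) : List (String × Bool) :=
  let l := expr.toList
  (parseB l (l.length + 1) 0 true PySem.Dict.empty).2.items

-- ===== PRECONDITION & SPEC =====
-- number of occurrences of c in l[i:j]
def cnt (l : List Char) (c : Char) (i j : Nat) : Nat := ((l.take j).drop i).count c

-- A raises IndexError (st[-1]/pop on the emptied stack) exactly when some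
-- '(' , ')' or variable character is preceded by more ')' than '(' ; those
-- inputs are excluded, nothing else is.
def Pre_evaluate (expr : String) : Prop :=
  ∀ k, k < expr.toList.length →
    ¬(expr.toList.getD k ' ' = '+' ∨ expr.toList.getD k ' ' = '-') →
    cnt expr.toList ')' 0 k ≤ cnt expr.toList '(' 0 k
instance (expr : String) : Decidable (Pre_evaluate expr) := by unfold Pre_evaluate; infer_instance

def pvWitness_evaluate : String := "a-(b+c)-(d-(e+f))"

def Spec_evaluate (expr : String) (out : List (String × Bool)) : Prop := out = evaluate_alt expr
instance (expr : String) (out : List (String × Bool)) : Decidable (Spec_evaluate expr out) := by unfold Spec_evaluate; infer_instance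

-- ===== CLAIM (what is proved, stated in full; the proofs are below) =====
def Claim_equal_evaluate : Prop := ∀ (expr : String), Dom_evaluate expr → Pre_evaluate expr → Spec_evaluate expr (evaluate expr)

-- ===== LEMMAS AND PROOFS =====

-- A's loop, resumed from index i
def runA (l : List Char) (i : Nat) (s : List Bool × PySem.Dict String Bool) :
    List Bool × PySem.Dict String Bool :=
  (List.range' i (l.length - i)).foldl (stepA l) s

lemma runA_end (l : List Char) (i : Nat) (s : List Bool × PySem.Dict String Bool)
    (h : l.length ≤ i) : runA l i s = s := by
  unfold runA
  rw [Nat.sub_eq_zero_of_le h]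
  rfl

lemma runA_step (l : List Char) (i : Nat) (s : List Bool × PySem.Dict String Bool)
    (h : i < l.length) : runA l i s = runA l (i+1) (stepA l s i) := by
  unfold runA
  have : l.length - i = (l.length - (i+1)) + 1 := by omega
  rw [this, List.range'_succ, List.foldl_cons]

lemma parseB_end (l : List Char) (fuel i : Nat) (sign : Bool)
    (cm : PySem.Dict String Bool) (h : ¬ i < l.length) :
    parseB l fuel i sign cm = (i, cm) := by
  cases fuel with
  | zero => rfl
  | succ f => simp [parseB, h]

lemma parseB_step (l : List Char) (f i : Nat) (sign : Bool) (cm : PySem.Dict String Bool)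
    (h : i < l.length) :
    parseB l (f+1) i sign cm =
      (if l.getD i ' ' = ')' then (i+1, cm)
       else if l.getD i ' ' = '(' then
         parseB l f
           (parseB l f (i+1) (sign != (decide (0 < i) && decide (l.getD (i-1) ' ' = '-'))) cm).1
           sign
           (parseB l f (i+1) (sign != (decide (0 < i) && decide (l.getD (i-1) ' ' = '-'))) cm).2
       else if l.getD i ' ' = '+' ∨ l.getD i ' ' = '-' then parseB l f (i+1) sign cm
       else parseB l f (i+1) sign
         (cm.insert (String.ofList [l.getD i ' '])
           ((!(decide (0 < i) && decide (l.getD (i-1) ' ' = '-'))) == sign))) := by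
  simp only [parseB, if_pos h]

lemma cnt_add (l : List Char) (c : Char) (i m j : Nat) (him : i ≤ m) (hmj : m ≤ j)
    (hj : j ≤ l.length) : cnt l c i j = cnt l c i m + cnt l c m j := by
  unfold cnt
  have hlm : (l.take m).length = m := List.length_take_of_le (le_trans hmj hj)
  have h1 : l.take j = l.take m ++ (l.take j).drop m := by
    conv_lhs => rw [← List.take_append_drop m (l.take j)]
    rw [List.take_take, Nat.min_eq_left hmj]
  conv_lhs => rw [h1]
  rw [List.drop_append, List.count_append, hlm, Nat.sub_eq_zero_of_le him, List.drop_zero]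

lemma cnt_single (l : List Char) (c : Char) (k : Nat) (h : k < l.length) :
    cnt l c k (k+1) = if l.getD k ' ' = c then 1 else 0 := by
  unfold cnt
  have h1 : l.take (k+1) = l.take k ++ [l[k]] := List.take_succ_eq_append_getElem h
  have h2 : List.drop k (List.take k l) = [] :=
    List.drop_eq_nil_of_le (le_of_eq (List.length_take_of_le (le_of_lt h)))
  rw [h1, List.drop_append, h2, List.length_take_of_le (le_of_lt h), Nat.sub_self,
    List.drop_zero, List.nil_append]
  rw [List.getD_eq_getElem l ' ' h]
  by_cases hc : l[k] = c
  · simp [hc]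
  · simp [hc]

-- the central correspondence: one call of B's parse from index i with inherited
-- sign behaves like A's loop run with stack sign::st, either consuming a whole
-- group up to (and including) its unmatched ')' (popping the stack once), or
-- running to the end of the string.
lemma parse_main (l : List Char) : ∀ (fuel i : Nat) (sign : Bool) (st : List Bool)
    (cm : PySem.Dict String Bool), l.length - i < fuel → i ≤ l.length →
    ∃ j cm', parseB l fuel i sign cm = (j, cm') ∧ i ≤ j ∧ j ≤ l.length ∧
      ((cnt l ')' i j = cnt l '(' i j + 1 ∧
        runA l i (sign::st, cm) = runA l j (st, cm'))
       ∨ (j = l.length ∧ (runA l i (sign::st, cm)).2 = cm')) := by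
  intro fuel
  induction fuel with
  | zero => intro i sign st cm hf; omega
  | succ f ih =>
    intro i sign st cm hf hi
    by_cases hlt : i < l.length
    · have hch := List.getD_eq_getElem l ' ' hlt
      set ch := l.getD i ' ' with hchdef
      by_cases hrp : ch = ')'
      · -- close paren: return i+1, pop
        refine ⟨i+1, cm, ?_, by omega, by omega, Or.inl ⟨?_, ?_⟩⟩
        · rw [parseB_step l f i sign cm hlt, ← hchdef, if_pos hrp]
        · rw [cnt_single l ')' i hlt, cnt_single l '(' i hlt, ← hchdef, hrp]
          simp
        · rw [runA_step l i _ hlt]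
          have hstep : stepA l (sign::st, cm) i = (st, cm) := by
            unfold stepA
            rw [← hchdef, hrp]
            simp
          rw [hstep]
      · by_cases hop : ch = '('
        · -- open paren: recurse into the group, then continue
          set neg := decide (0 < i) && decide (l.getD (i-1) ' ' = '-') with hneg
          have hsub := ih (i+1) (sign != neg) (sign::st) cm (by omega) (by omega)
          obtain ⟨j1, cm1, hpar1, hij1, hj1n, hcase1⟩ := hsub
          have hstep : stepA l (sign::st, cm) i = ((sign != neg)::sign::st, cm) := by
            unfold stepA
            rw [← hchdef, hop]
            by_cases hneg' : 0 < i ∧ l.getD (i-1) ' ' = '-'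
            · rw [if_pos hneg']
              have : neg = true := by
                rw [hneg, decide_eq_true hneg'.1, decide_eq_true hneg'.2, Bool.and_self]
              simp [this]
            · rw [if_neg hneg']
              have : neg = false := by
                rcases Decidable.not_and_iff_or_not.mp hneg' with h | h
                · rw [hneg, decide_eq_false h, Bool.false_and]
                · rw [hneg, decide_eq_false h, Bool.and_false]
              simp [this]
          have hA1 : runA l i (sign::st, cm) = runA l (i+1) ((sign != neg)::sign::st, cm) := by
            rw [runA_step l i _ hlt, hstep]
          rcases hcase1 with ⟨hcnt1, hrun1⟩ | ⟨hend1, hrun1⟩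
          · -- sub-group closed at j1; continue scanning from j1
            have hcont := ih j1 sign st cm1 (by omega) hj1n
            obtain ⟨j, cm', hpar2, hjj, hjn, hcase2⟩ := hcont
            refine ⟨j, cm', ?_, by omega, hjn, ?_⟩
            · rw [parseB_step l f i sign cm hlt, ← hchdef, if_neg hrp, if_pos hop,
                ← hneg, hpar1]
              simp only []
              rw [hpar2]
            rcases hcase2 with ⟨hcnt2, hrun2⟩ | ⟨hend2, hrun2⟩
            · refine Or.inl ⟨?_, ?_⟩
              · have e1 := cnt_add l ')' i (i+1) j (by omega) (by omega) hjn
                have e2 := cnt_add l ')' (i+1) j1 j hij1 (by omega) hjn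
                have e3 := cnt_add l '(' i (i+1) j (by omega) (by omega) hjn
                have e4 := cnt_add l '(' (i+1) j1 j hij1 (by omega) hjn
                have s1 : cnt l ')' i (i+1) = 0 := by
                  rw [cnt_single l ')' i hlt, ← hchdef, hop]; simp
                have s2 : cnt l '(' i (i+1) = 1 := by
                  rw [cnt_single l '(' i hlt, ← hchdef, hop]; simp
                omega
              · rw [hA1, hrun1, hrun2]
            · exact Or.inr ⟨hend2, by rw [hA1, hrun1, hrun2]⟩
          · -- sub-group ran to the end of the string
            refine ⟨l.length, cm1, ?_, by omega, le_refl _, Or.inr ⟨rfl, ?_⟩⟩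
            · rw [parseB_step l f i sign cm hlt, ← hchdef, if_neg hrp, if_pos hop,
                ← hneg, hpar1]
              simp only []
              subst hend1
              exact parseB_end l f l.length sign cm1 (by omega)
            · rw [hA1, hrun1]
        · by_cases hpm : ch = '+' ∨ ch = '-'
          · -- sign character: both sides skip it
            have hsub := ih (i+1) sign st cm (by omega) (by omega)
            obtain ⟨j, cm', hpar1, hij, hjn, hcase⟩ := hsub
            refine ⟨j, cm', ?_, by omega, hjn, ?_⟩
            · rw [parseB_step l f i sign cm hlt, ← hchdef, if_neg hrp, if_neg hop, if_pos hpm]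
              exact hpar1
            have hstep : stepA l (sign::st, cm) i = (sign::st, cm) := by
              unfold stepA
              rw [← hchdef]
              rw [if_neg hop, if_neg hrp, if_pos hpm]
            have hA1 : runA l i (sign::st, cm) = runA l (i+1) (sign::st, cm) := by
              rw [runA_step l i _ hlt, hstep]
            have s1 : cnt l ')' i (i+1) = 0 := by
              rw [cnt_single l ')' i hlt, ← hchdef]
              rcases hpm with h | h <;> simp [h]
            have s2 : cnt l '(' i (i+1) = 0 := by
              rw [cnt_single l '(' i hlt, ← hchdef]
              rcases hpm with h | h <;> simp [h]
            rcases hcase with ⟨hcnt, hrun⟩ | ⟨hend, hrun⟩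
            · refine Or.inl ⟨?_, by rw [hA1, hrun]⟩
              have e1 := cnt_add l ')' i (i+1) j (by omega) (by omega) hjn
              have e2 := cnt_add l '(' i (i+1) j (by omega) (by omega) hjn
              omega
            · exact Or.inr ⟨hend, by rw [hA1, hrun]⟩
          · -- variable character: both sides record the same sign
            set minus := decide (0 < i) && decide (l.getD (i-1) ' ' = '-') with hminus
            set cm2 := cm.insert (String.ofList [ch]) ((!minus) == sign) with hcm2
            have hsub := ih (i+1) sign st cm2 (by omega) (by omega)
            obtain ⟨j, cm', hpar1, hij, hjn, hcase⟩ := hsub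
            refine ⟨j, cm', ?_, by omega, hjn, ?_⟩
            · rw [parseB_step l f i sign cm hlt, ← hchdef, if_neg hrp, if_neg hop, if_neg hpm,
                ← hminus, ← hcm2]
              exact hpar1
            have hstep : stepA l (sign::st, cm) i = (sign::st, cm2) := by
              unfold stepA
              rw [← hchdef, if_neg hop, if_neg hrp, if_neg hpm]
              simp only [List.headD_cons]
              rw [hcm2, hminus]
            have hA1 : runA l i (sign::st, cm) = runA l (i+1) (sign::st, cm2) := by
              rw [runA_step l i _ hlt, hstep]
            have s1 : cnt l ')' i (i+1) = 0 := by
              rw [cnt_single l ')' i hlt, ← hchdef]; simp [hrp]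
            have s2 : cnt l '(' i (i+1) = 0 := by
              rw [cnt_single l '(' i hlt, ← hchdef]; simp [hop]
            rcases hcase with ⟨hcnt, hrun⟩ | ⟨hend, hrun⟩
            · refine Or.inl ⟨?_, by rw [hA1, hrun]⟩
              have e1 := cnt_add l ')' i (i+1) j (by omega) (by omega) hjn
              have e2 := cnt_add l '(' i (i+1) j (by omega) (by omega) hjn
              omega
            · exact Or.inr ⟨hend, by rw [hA1, hrun]⟩
    · refine ⟨i, cm, parseB_end l (f+1) i sign cm hlt, le_refl _, hi, Or.inr ⟨by omega, ?_⟩⟩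
      rw [runA_end l i _ (by omega)]

-- after the top-level unmatched ')', only '+'/'-' remain: A's loop changes nothing
lemma runA_pm (l : List Char) : ∀ (i : Nat) (s : List Bool × PySem.Dict String Bool),
    (∀ k, i ≤ k → k < l.length → l.getD k ' ' = '+' ∨ l.getD k ' ' = '-') →
    runA l i s = s := by
  intro i
  induction hm : l.length - i generalizing i with
  | zero => intro s _; exact runA_end l i s (by omega)
  | succ m ihm =>
    intro s hall
    have hlt : i < l.length := by omega
    rw [runA_step l i s hlt]
    have hstep : stepA l s i = s := by
      unfold stepA
      rcases hall i (le_refl i) hlt with h | h <;>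
        · rw [h]; simp
    rw [hstep]
    exact ihm (i+1) (by omega) s (fun k hk1 hk2 => hall k (by omega) hk2)

lemma cnt_zero_of_pm (l : List Char) (c : Char) (hc : c = '(' ∨ c = ')') :
    ∀ (d i j : Nat), j - i ≤ d → i ≤ j → j ≤ l.length →
    (∀ m, i ≤ m → m < j → l.getD m ' ' = '+' ∨ l.getD m ' ' = '-') →
    cnt l c i j = 0 := by
  intro d
  induction d with
  | zero =>
    intro i j hd hij hj _
    have : i = j := by omega
    subst this
    unfold cnt
    rw [List.drop_eq_nil_of_le (List.length_take_le i l), List.count_nil]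
  | succ d ihd =>
    intro i j hd hij hj hall
    by_cases hlt : i < j
    · have h1 : i < l.length := by omega
      have e := cnt_add l c i (i+1) j (by omega) (by omega) hj
      have s1 : cnt l c i (i+1) = 0 := by
        rw [cnt_single l c i h1]
        rcases hall i (le_refl i) hlt with h | h <;>
          · rw [h]; rcases hc with h' | h' <;> simp [h']
      have hrest : cnt l c (i+1) j = 0 :=
        ihd (i+1) j (by omega) (by omega) hj (fun m hm1 hm2 => hall m (by omega) hm2)
      omega
    · have : i = j := by omega
      subst this
      unfold cnt
      rw [List.drop_eq_nil_of_le (List.length_take_le i l), List.count_nil]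

-- ===== VERDICT (by name: the statement is the Claim_ definition above) =====
theorem evaluate_spec : Claim_equal_evaluate := by
  intro expr _ hpre
  unfold Pre_evaluate at hpre
  unfold Spec_evaluate evaluate evaluate_alt
  show ((List.range expr.toList.length).foldl (stepA expr.toList)
          ([true], PySem.Dict.empty)).2.items
      = (parseB expr.toList (expr.toList.length + 1) 0 true PySem.Dict.empty).2.items
  obtain ⟨j, cm', hpar, hij, hjn, hcase⟩ :=
    parse_main expr.toList (expr.toList.length + 1) 0 true [] PySem.Dict.empty
      (by omega) (by omega)
  rw [hpar]
  have hA : (List.range expr.toList.length).foldl (stepA expr.toList)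
      ([true], PySem.Dict.empty) = runA expr.toList 0 ([true], PySem.Dict.empty) := by
    unfold runA
    rw [List.range_eq_range', Nat.sub_zero]
  rw [hA]
  rcases hcase with ⟨hcnt, hrun⟩ | ⟨_, hrun⟩
  · -- top-level close: everything after j is '+'/'-'
    have hall : ∀ k, j ≤ k → k < expr.toList.length →
        expr.toList.getD k ' ' = '+' ∨ expr.toList.getD k ' ' = '-' := by
      intro k
      induction k using Nat.strong_induction_on with
      | _ k ihk =>
        intro hjk hkn
        by_contra hnot
        have hle := hpre k hkn hnot
        have hz1 : cnt expr.toList ')' j k = 0 :=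
          cnt_zero_of_pm expr.toList ')' (Or.inr rfl) (k - j) j k (by omega) hjk
            (by omega) (fun m hm1 hm2 => ihk m hm2 (by omega) (by omega))
        have hz2 : cnt expr.toList '(' j k = 0 :=
          cnt_zero_of_pm expr.toList '(' (Or.inl rfl) (k - j) j k (by omega) hjk
            (by omega) (fun m hm1 hm2 => ihk m hm2 (by omega) (by omega))
        have e1 := cnt_add expr.toList ')' 0 j k (by omega) hjk (by omega)
        have e2 := cnt_add expr.toList '(' 0 j k (by omega) hjk (by omega)
        omega
    rw [hrun, runA_pm expr.toList j _ hall]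
  · rw [hrun]
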